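-- pv_equiv track=rewrite | github.com/lautaroballesteros0926/asersiones_p-ruebas- | Actividad15/count_words.py | count
-- ===== SOURCE A (Python) =====
-- def count(s: str) -> int:
--     words = 0
--     last = ' '
--
--     for char in s:
--         if not char.isalpha() and last in {'s', 'r'}:
--             words += 1
--         last = char
--
--     # Solo incrementamos si el último carácter es 'r' o 's'
--     if last in {'s', 'r'}:
--         words += 1
--
--     return words
-- ===== SOURCE B (Python) =====
-- def count(s: str) -> int:
--     total = 0
--     i, n = 0, len(s)
--     while i < n:
--         if not s[i].isalpha():
--             i += 1
--         else:
--             j = i + 1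
--             while j < n and s[j].isalpha():
--                 j += 1
--             if s[j - 1] in ('s', 'r'):
--                 total += 1
--             i = j
--     return total
-- ===== Notes on version B (the rewrite author's own statement) =====
-- stated objective: alternative
-- what changed: A scans char-by-char with a remembered previous character and a lookbehind trigger; B instead segments the string into maximal alphabetic runs, skipping non-alphabetic characters and testing only the last character of each run.
import Mathlib
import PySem

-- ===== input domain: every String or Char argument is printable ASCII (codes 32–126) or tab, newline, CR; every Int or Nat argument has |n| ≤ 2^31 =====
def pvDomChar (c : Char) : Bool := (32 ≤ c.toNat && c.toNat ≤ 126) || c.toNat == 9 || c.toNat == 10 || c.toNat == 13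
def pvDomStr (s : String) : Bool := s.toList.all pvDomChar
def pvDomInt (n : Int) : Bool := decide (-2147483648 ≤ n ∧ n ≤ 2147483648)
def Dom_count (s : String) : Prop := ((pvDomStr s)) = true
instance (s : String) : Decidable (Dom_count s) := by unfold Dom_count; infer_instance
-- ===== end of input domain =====

-- B replaces A's lookbehind state machine by segmentation into maximal alphabetic runs (alternative decomposition, same cost).

-- ===== PORT A =====
-- literal port of A: fold over the characters carrying (words, last), then the final check
def count (s : String) : Int :=
  let r := s.toList.foldl
    (fun (st : Int × Char) (ch : Char) =>
      ((if ¬ (PySem.Chars.isalpha ch = true) ∧ (st.2 = 's' ∨ st.2 = 'r') then st.1 + 1 else st.1), ch))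
    (0, ' ')
  if r.2 = 's' ∨ r.2 = 'r' then r.1 + 1 else r.1

-- ===== PORT B =====
-- port of Source B's outer while loop: skip a non-alphabetic char, or consume a whole
-- alphabetic run (the inner index loop = takeWhile/dropWhile) and test its last char
def countRuns : List Char → Int
  | [] => 0
  | c :: rest =>
    if PySem.Chars.isalpha c then
      let run := List.takeWhile PySem.Chars.isalpha (c :: rest)
      let rest' := List.dropWhile PySem.Chars.isalpha (c :: rest)
      (if run.getLast? = some 's' ∨ run.getLast? = some 'r' then 1 else 0) + countRuns rest'
    else countRuns rest
termination_by l => l.length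
decreasing_by
  · simp only [List.dropWhile]
    split
    · exact Nat.lt_succ_of_le (List.length_dropWhile_le _ _)
    · simp_all
  · simp

def count_alt (s : String) : Int := countRuns s.toList

-- ===== PRECONDITION & SPEC =====
def Spec_count (s : String) (out : Int) : Prop := out = count_alt s
instance (s : String) (out : Int) : Decidable (Spec_count s out) := by unfold Spec_count; infer_instance

-- ===== CLAIM (what is proved, stated in full; the proofs are below) =====
def Claim_equal_count : Prop := ∀ (s : String), Dom_count s → Spec_count s (count s)

-- ===== LEMMAS AND PROOFS =====

-- residual count of A's loop given the previous character `last`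
def gA : List Char → Char → Int
  | [], last => if last = 's' ∨ last = 'r' then 1 else 0
  | c :: t, last =>
    (if ¬ (PySem.Chars.isalpha c = true) ∧ (last = 's' ∨ last = 'r') then 1 else 0) + gA t c

theorem fold_eq_gA (l : List Char) : ∀ (w : Int) (last : Char),
    (let r := l.foldl
      (fun (st : Int × Char) (ch : Char) =>
        ((if ¬ (PySem.Chars.isalpha ch = true) ∧ (st.2 = 's' ∨ st.2 = 'r') then st.1 + 1 else st.1), ch))
      (w, last)
     if r.2 = 's' ∨ r.2 = 'r' then r.1 + 1 else r.1) = w + gA l last := by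
  induction l with
  | nil => intro w last; simp [gA]; split_ifs <;> omega
  | cons c t ih =>
    intro w last
    simp only [List.foldl_cons, gA]
    rw [ih]
    split_ifs <;> omega

theorem sr_alpha : PySem.Chars.isalpha 's' = true ∧ PySem.Chars.isalpha 'r' = true := by decide

theorem gA_eq_countRuns (t : List Char) : ∀ (c : Char),
    gA t c = if PySem.Chars.isalpha c then
        (if (c :: List.takeWhile PySem.Chars.isalpha t).getLast? = some 's' ∨
            (c :: List.takeWhile PySem.Chars.isalpha t).getLast? = some 'r' then 1 else 0)
          + countRuns (List.dropWhile PySem.Chars.isalpha t)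
      else countRuns t := by
  induction t with
  | nil =>
    intro c
    by_cases hc : PySem.Chars.isalpha c = true
    · simp [gA, hc, List.takeWhile, List.dropWhile, countRuns]
    · have hs : c ≠ 's' := fun h => hc (h ▸ sr_alpha.1)
      have hr : c ≠ 'r' := fun h => hc (h ▸ sr_alpha.2)
      simp [gA, hc, countRuns, hs, hr]
  | cons d t' ih =>
    intro c
    by_cases hc : PySem.Chars.isalpha c = true
    · by_cases hd : PySem.Chars.isalpha d = true
      · simp only [gA, hc, hd, List.takeWhile, List.dropWhile, if_pos, not_true,
          false_and, if_false, ih d, List.getLast?_cons_cons]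
        omega
      · have hcr : countRuns (d :: t') = countRuns t' := by
          rw [countRuns]; simp [hd]
        simp only [gA, ih d, hd, if_neg, Bool.false_eq_true, not_false_iff]
        simp only [List.takeWhile, List.dropWhile, hd, if_pos, hc]
        simp [hcr]
    · have hs : c ≠ 's' := fun h => hc (h ▸ sr_alpha.1)
      have hr : c ≠ 'r' := fun h => hc (h ▸ sr_alpha.2)
      by_cases hd : PySem.Chars.isalpha d = true
      · have : countRuns (d :: t') =
            (if (d :: List.takeWhile PySem.Chars.isalpha t').getLast? = some 's' ∨
                (d :: List.takeWhile PySem.Chars.isalpha t').getLast? = some 'r' then 1 else 0)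
              + countRuns (List.dropWhile PySem.Chars.isalpha t') := by
          rw [countRuns]; simp [hd, List.takeWhile, List.dropWhile]
        simp only [gA, hs, hr, or_self, and_false, if_false, ih d, hd, if_pos, hc]
        simp only [Bool.false_eq_true, if_false, zero_add]
        exact this.symm
      · have hcr : countRuns (d :: t') = countRuns t' := by
          rw [countRuns]; simp [hd]
        simp [gA, hs, hr, hc, ih d, hd, hcr]

-- ===== VERDICT (by name: the statement is the Claim_ definition above) =====
theorem count_spec : Claim_equal_count := by
  intro s _
  show count s = count_alt s
  unfold count count_alt
  rw [fold_eq_gA, gA_eq_countRuns]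
  have h : PySem.Chars.isalpha ' ' = false := by decide
  cases l : s.toList with
  | nil => simp [h, countRuns]
  | cons c t =>
    rw [countRuns]
    simp [h]
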